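-- pv_equiv track=rewrite | github.com/Sorokovsky/algorithms-lab2 | task-1.py | process_array
-- ===== SOURCE A (Python) =====
-- def process_array(array: list) -> list:
--     min = None
--     max = None
--     result = []
--     for item in array:
--         result.append(item)
--         if item < 0:
--             if max is None:
--                 max = item
--             elif item > max:
--                 max = item
--         else:
--             if min is None:
--                 min = item
--             elif item < min:
--                 min = item
--     if max is not None:
--         result.insert(0, max)
--     if min is not None:
--         result.insert(len(result), min)
--     return result
-- ===== SOURCE B (Python) =====
-- def process_array(array: list) -> list:
--     # Sort a copy; negatives form a prefix. Binary-search the first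
--     # non-negative position, then read the max negative (just before it)
--     # and the min non-negative (at it) directly from the sorted list.
--     s = sorted(array)
--     lo, hi = 0, len(s)
--     while lo < hi:
--         mid = (lo + hi) // 2
--         if s[mid] < 0:
--             lo = mid + 1
--         else:
--             hi = mid
--     result = list(array)
--     if lo > 0:
--         result = [s[lo - 1]] + result
--     if lo < len(s):
--         result = result + [s[lo]]
--     return result
-- ===== Notes on version B (the rewrite author's own statement) =====
-- stated objective: alternative
-- what changed: Replaced A's single fused loop maintaining running max-negative/min-nonnegative with a sort of a copy followed by a hand-written binary search for the first non-negative position; the max negative and min non-negative are read off the sorted list at that boundary.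
import Mathlib
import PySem

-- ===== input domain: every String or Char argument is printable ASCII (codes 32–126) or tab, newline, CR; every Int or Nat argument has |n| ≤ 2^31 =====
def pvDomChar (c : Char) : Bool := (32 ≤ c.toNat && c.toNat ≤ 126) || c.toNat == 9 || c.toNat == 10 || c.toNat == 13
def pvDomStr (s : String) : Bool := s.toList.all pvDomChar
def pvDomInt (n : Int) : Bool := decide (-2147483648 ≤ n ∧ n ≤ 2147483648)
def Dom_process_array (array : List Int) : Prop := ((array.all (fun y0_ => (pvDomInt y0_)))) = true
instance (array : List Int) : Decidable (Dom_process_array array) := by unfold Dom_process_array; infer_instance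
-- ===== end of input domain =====

-- B replaces A's single fused loop (running max of negatives / min of non-negatives) with
-- sort + binary search for the negative/non-negative boundary; same values, different algorithm.

-- ===== PORT A =====
-- A's loop: state (min, max, result); branches in source order.
def paStep (st : Option Int × Option Int × List Int) (item : Int) : Option Int × Option Int × List Int :=
  let (mn, mx, res) := st
  let res := res ++ [item]
  if item < 0 then
    match mx with
    | none => (mn, some item, res)
    | some m => if item > m then (mn, some item, res) else (mn, some m, res)
  else
    match mn with
    | none => (some item, mx, res)
    | some m => if item < m then (some item, mx, res) else (some m, mx, res)

def process_array (array : List Int) : List Int :=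
  let (mn, mx, res) := array.foldl paStep (none, none, [])
  let res := match mx with | some m => m :: res | none => res
  let res := match mn with | some m => res ++ [m] | none => res
  res

-- ===== PORT B =====
-- Source B's while-loop binary search; s[mid] is always in range (0 ≤ lo ≤ mid < hi ≤ len s), so
-- List.getD is exact for Python's s[mid] here.
def pbSearch (s : List Int) (lo hi : Nat) : Nat :=
  if _h : lo < hi then
    let mid := (lo + hi) / 2
    if s.getD mid 0 < 0 then pbSearch s (mid + 1) hi else pbSearch s lo mid
  else lo
termination_by hi - lo
decreasing_by all_goals omega

def process_array_alt (array : List Int) : List Int :=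
  let s := PySem.List.sorted array (fun x => x) false
  let lo := pbSearch s 0 s.length
  let result := array
  let result := if lo > 0 then [s.getD (lo - 1) 0] ++ result else result
  if lo < s.length then result ++ [s.getD lo 0] else result

-- ===== PRECONDITION & SPEC =====
def Spec_process_array (array : List Int) (out : List Int) : Prop := out = process_array_alt array
instance (array : List Int) (out : List Int) : Decidable (Spec_process_array array out) := by unfold Spec_process_array; infer_instance

-- ===== CLAIM =====
def Claim_equal_process_array : Prop := ∀ (array : List Int), Dom_process_array array → Spec_process_array array (process_array array)

-- ===== LEMMAS AND PROOFS =====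

theorem pa_fold_inv (l : List Int) (mn mx : Option Int) (res : List Int) :
    l.foldl paStep (mn, mx, res) =
      ((l.filter (fun x => x >= 0)).foldl (fun o x => match o with
          | none => some x | some m => if x < m then some x else some m) mn,
       (l.filter (fun x => x < 0)).foldl (fun o x => match o with
          | none => some x | some m => if x > m then some x else some m) mx,
       res ++ l) := by
  induction l generalizing mn mx res with
  | nil => simp
  | cons h t ih =>
    by_cases hneg : h < 0
    · have hfilt : ¬ (h ≥ 0) := by omega
      simp [paStep, hneg, hfilt, ih]
      cases mx with
      | none => simp
      | some m => by_cases hgt : h > m <;> simp [hgt]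
    · have hge : h ≥ 0 := by omega
      simp [paStep, hneg, hge, ih]
      cases mn with
      | none => simp
      | some m => by_cases hlt : h < m <;> simp [hlt]

theorem fold_max_eq (l : List Int) :
    l.foldl (fun o x => match o with
        | none => some x | some m => if x > m then some x else some m) (none : Option Int)
      = PySem.List.max? l (fun y => y) := by
  cases l with
  | nil => simp [PySem.List.max?]
  | cons h t =>
    rw [PySem.List.max?_id_cons]
    have : ∀ (a : Int), t.foldl (fun o x => match o with
        | none => some x | some m => if x > m then some x else some m) (some a)
        = some (t.foldl max a) := by
      induction t with
      | nil => intro a; simp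
      | cons x xs ih =>
        intro a
        by_cases hx : x > a
        · simp [hx, ih, max_eq_right (le_of_lt hx)]
        · simp [hx, ih, max_eq_left (by omega : x ≤ a)]
    simp [this]

theorem fold_min_eq (l : List Int) :
    l.foldl (fun o x => match o with
        | none => some x | some m => if x < m then some x else some m) (none : Option Int)
      = PySem.List.min? l (fun y => y) := by
  cases l with
  | nil => simp [PySem.List.min?]
  | cons h t =>
    rw [PySem.List.min?_id_cons]
    have : ∀ (a : Int), t.foldl (fun o x => match o with
        | none => some x | some m => if x < m then some x else some m) (some a)
        = some (t.foldl min a) := by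
      induction t with
      | nil => intro a; simp
      | cons x xs ih =>
        intro a
        by_cases hx : x < a
        · simp [hx, ih, min_eq_right (le_of_lt hx)]
        · simp [hx, ih, min_eq_left (by omega : a ≤ x)]
    simp [this]

-- binary-search invariant: result r lies in [lo,hi]; everything in [lo,r) is negative,
-- everything in [r,hi) is non-negative — assuming s is monotone on getD.
theorem pbSearch_inv (s : List Int)
    (hmono : ∀ p q, p ≤ q → q < s.length → s.getD p 0 ≤ s.getD q 0) :
    ∀ lo hi, lo ≤ hi → hi ≤ s.length →
      lo ≤ pbSearch s lo hi ∧ pbSearch s lo hi ≤ hi ∧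
      (∀ i, lo ≤ i → i < pbSearch s lo hi → s.getD i 0 < 0) ∧
      (∀ i, pbSearch s lo hi ≤ i → i < hi → 0 ≤ s.getD i 0) := by
  intro lo hi
  induction lo, hi using pbSearch.induct s with
  | case1 lo hi hlt mid hneg ih =>
    intro _ hhi
    have hmideq : mid = (lo + hi) / 2 := rfl
    rw [hmideq] at hneg ih
    rw [pbSearch]
    simp only [dif_pos hlt, if_pos hneg]
    obtain ⟨h1, h2, h3, h4⟩ := ih (by omega) hhi
    refine ⟨by omega, h2, ?_, h4⟩
    intro i hi1 hi2
    by_cases hcase : i ≤ (lo + hi) / 2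
    · calc s.getD i 0 ≤ s.getD ((lo + hi) / 2) 0 := hmono _ _ hcase (by omega)
        _ < 0 := hneg
    · exact h3 i (by omega) hi2
  | case2 lo hi hlt mid hge ih =>
    intro _ hhi
    have hmideq : mid = (lo + hi) / 2 := rfl
    rw [hmideq] at hge ih
    rw [pbSearch]
    simp only [dif_pos hlt, if_neg hge]
    obtain ⟨h1, h2, h3, h4⟩ := ih (by omega) (by omega)
    refine ⟨h1, by omega, h3, ?_⟩
    intro i hi1 hi2
    by_cases hcase : i < (lo + hi) / 2
    · exact h4 i hi1 hcase
    · calc (0 : Int) ≤ s.getD ((lo + hi) / 2) 0 := by omega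
        _ ≤ s.getD i 0 := hmono _ _ (by omega) (by omega)
  | case3 lo hi hlt =>
    intro hle _
    rw [pbSearch]
    simp only [dif_neg hlt]
    exact ⟨le_refl _, hle, fun i h1 h2 => absurd (Nat.lt_of_le_of_lt h1 h2) (lt_irrefl _),
      fun i h1 h2 => absurd (Nat.lt_of_le_of_lt h1 h2) hlt⟩

-- ===== VERDICT =====
theorem process_array_spec : Claim_equal_process_array := by
  intro array _
  show process_array array = process_array_alt array
  unfold process_array process_array_alt
  rw [pa_fold_inv, fold_max_eq, fold_min_eq]
  set s := PySem.List.sorted array (fun x => x) false with hs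
  have hperm : s.Perm array := PySem.List.sorted_perm array (fun x => x) false
  have hmono : ∀ p q, p ≤ q → q < s.length → s.getD p 0 ≤ s.getD q 0 := by
    intro p q hpq hq
    rw [List.getD_eq_getElem s 0 (Nat.lt_of_le_of_lt hpq hq), List.getD_eq_getElem s 0 hq]
    exact PySem.List.sorted_id_getElem_mono array hpq hq
  have hmemidx : ∀ y ∈ array, ∃ i, i < s.length ∧ s.getD i 0 = y := by
    intro y hy
    obtain ⟨i, hi, hval⟩ := List.mem_iff_getElem.mp (hperm.mem_iff.mpr hy)
    exact ⟨i, hi, by rw [List.getD_eq_getElem s 0 hi, hval]⟩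
  have hidxmem : ∀ i, i < s.length → s.getD i 0 ∈ array := by
    intro i hi
    rw [List.getD_eq_getElem s 0 hi]
    exact hperm.mem_iff.mp (List.getElem_mem hi)
  obtain ⟨h0r, hrn, hneg, hnonneg⟩ :=
    pbSearch_inv s hmono 0 s.length (Nat.zero_le _) (le_refl _)
  set r := pbSearch s 0 s.length with hr
  -- max? of the negatives
  have hmax : PySem.List.max? (array.filter (fun x => x < 0)) (fun y => y)
      = if r > 0 then some (s.getD (r - 1) 0) else none := by
    by_cases h0 : r > 0
    · simp only [if_pos h0]
      have hM1 : r - 1 < s.length := by omega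
      have hMneg : s.getD (r - 1) 0 < 0 := hneg (r - 1) (Nat.zero_le _) (by omega)
      have hMmem : s.getD (r - 1) 0 ∈ array.filter (fun x => x < 0) :=
        List.mem_filter.mpr ⟨hidxmem _ hM1, by simpa using hMneg⟩
      have hub : ∀ y ∈ array.filter (fun x => x < 0), y ≤ s.getD (r - 1) 0 := by
        intro y hy
        obtain ⟨hya, hyneg⟩ := List.mem_filter.mp hy
        obtain ⟨i, hilen, hival⟩ := hmemidx y hya
        have hir : i < r := by
          by_contra hge
          have := hnonneg i (by omega) hilen
          simp at hyneg; omega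
        calc y = s.getD i 0 := hival.symm
          _ ≤ s.getD (r - 1) 0 := hmono _ _ (by omega) hM1
      cases hm : PySem.List.max? (array.filter (fun x => x < 0)) (fun y => y) with
      | none =>
        exact absurd ((PySem.List.max?_eq_none_iff _ _).mp hm) (List.ne_nil_of_mem hMmem)
      | some m =>
        have h1 : m ≤ s.getD (r - 1) 0 := hub m (PySem.List.max?_mem hm)
        have h2 : s.getD (r - 1) 0 ≤ m := PySem.List.max?_isMax hm _ hMmem
        exact congrArg some (le_antisymm h1 h2)
    · simp only [if_neg h0]
      rw [PySem.List.max?_eq_none_iff]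
      rw [List.filter_eq_nil_iff]
      intro y hy
      obtain ⟨i, hilen, hival⟩ := hmemidx y hy
      have := hnonneg i (by omega) hilen
      simp; omega
  -- min? of the non-negatives
  have hmin : PySem.List.min? (array.filter (fun x => x ≥ 0)) (fun y => y)
      = if r < s.length then some (s.getD r 0) else none := by
    by_cases hn : r < s.length
    · simp only [if_pos hn]
      have hMge : 0 ≤ s.getD r 0 := hnonneg r (le_refl _) hn
      have hMmem : s.getD r 0 ∈ array.filter (fun x => x ≥ 0) :=
        List.mem_filter.mpr ⟨hidxmem _ hn, by simpa using hMge⟩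
      have hlb : ∀ y ∈ array.filter (fun x => x ≥ 0), s.getD r 0 ≤ y := by
        intro y hy
        obtain ⟨hya, hyge⟩ := List.mem_filter.mp hy
        obtain ⟨i, hilen, hival⟩ := hmemidx y hya
        have hir : r ≤ i := by
          by_contra hlt
          have := hneg i (by omega) (by omega)
          simp at hyge; omega
        calc s.getD r 0 ≤ s.getD i 0 := hmono _ _ hir hilen
          _ = y := hival
      cases hm : PySem.List.min? (array.filter (fun x => x ≥ 0)) (fun y => y) with
      | none =>
        exact absurd ((PySem.List.min?_eq_none_iff _ _).mp hm) (List.ne_nil_of_mem hMmem)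
      | some m =>
        exact congrArg some (le_antisymm (PySem.List.min?_isMin hm _ hMmem)
          (hlb m (PySem.List.min?_mem hm)))
    · simp only [if_neg hn]
      rw [PySem.List.min?_eq_none_iff]
      rw [List.filter_eq_nil_iff]
      intro y hy
      obtain ⟨i, hilen, hival⟩ := hmemidx y hy
      have := hneg i (by omega) (by omega)
      simp; omega
  rw [hmax, hmin]
  simp only [← hr]
  by_cases h0 : 0 < r <;> by_cases hn : r < s.length <;>
    simp [h0, hn]
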